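-- pv_equiv track=rewrite | github.com/jasonkim8652/protein-design-mcp | src/protein_design_mcp/utils/conservation.py | parse_blast_results
-- ===== SOURCE A (Python) =====
-- def parse_blast_results(blast_output: str) -> list[str]:
--     """
--     Parse BLAST output to extract aligned sequences.
--
--     Args:
--         blast_output: BLAST output (FASTA format or tabular)
--
--     Returns:
--         List of aligned sequences
--     """
--     if not blast_output.strip():
--         return []
--
--     sequences = []
--
--     # Try parsing FASTA format
--     if blast_output.strip().startswith(">"):
--         current_seq = []
--         for line in blast_output.strip().split("\n"):
--             if line.startswith(">"):
--                 if current_seq: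
--                     sequences.append("".join(current_seq))
--                 current_seq = []
--             else:
--                 current_seq.append(line.strip())
--         if current_seq:
--             sequences.append("".join(current_seq))
--     else:
--         # Try parsing tabular format (outfmt 6)
--         for line in blast_output.strip().split("\n"):
--             parts = line.strip().split("\t")
--             if len(parts) >= 2:
--                 seq = parts[-1].replace("-", "")  # Remove gaps
--                 if seq:
--                     sequences.append(seq)
--
--     return sequences
-- ===== SOURCE B (Python) =====
-- def parse_blast_results(blast_output: str) -> list[str]:
--     """
--     Parse BLAST output to extract aligned sequences.
--
--     Args:
--         blast_output: BLAST output (FASTA format or tabular)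
--
--     Returns:
--         List of aligned sequences
--     """
--     text = blast_output.strip()
--     if not text:
--         return []
--     if text.startswith(">"):
--         # Records are delimited by splitting the raw text on "\n>" (a newline
--         # immediately followed by a header marker), so no per-line header test
--         # is needed; each record's first line is its header, the rest its body.
--         records = text.split("\n>")
--         return ["".join(l.strip() for l in r.split("\n")[1:])
--                 for r in records if "\n" in r]
--     rows = [line.strip().split("\t") for line in text.split("\n")]
--     return [s for s in (p[-1].replace("-", "") for p in rows if len(p) >= 2) if s]
-- ===== Notes on version B (the rewrite author's own statement) =====
-- stated objective: alternative
-- what changed: FASTA records are obtained by splitting the raw text on the two-character delimiter (a newline immediately followed by a header marker), so there is no per-line header test, no carried accumulator and no end-of-input flush, each record being joined from its stripped body lines by a comprehension; the tabular branch becomes a staged split-rows/filter/map/filter comprehension pipeline instead of an appending loop.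
import Mathlib
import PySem

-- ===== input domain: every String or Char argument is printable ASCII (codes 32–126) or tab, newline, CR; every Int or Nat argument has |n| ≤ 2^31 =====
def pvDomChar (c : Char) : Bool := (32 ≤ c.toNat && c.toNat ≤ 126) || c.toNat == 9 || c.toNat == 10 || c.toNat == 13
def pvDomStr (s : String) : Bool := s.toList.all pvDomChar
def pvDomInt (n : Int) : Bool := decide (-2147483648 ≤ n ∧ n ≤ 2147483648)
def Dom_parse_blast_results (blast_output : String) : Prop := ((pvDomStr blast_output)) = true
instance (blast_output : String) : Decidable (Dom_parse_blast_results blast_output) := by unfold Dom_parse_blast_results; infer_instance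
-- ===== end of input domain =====

-- B obtains FASTA records by splitting the raw text on the two-character newline-then-header
-- delimiter (no per-line header test, no carried accumulator, no end-of-input flush) and joins
-- each record's stripped body lines in a comprehension; the tabular branch becomes a staged
-- split-rows/filter/map/filter pipeline. Objective: alternative decomposition, same cost.

-- ===== PORT A =====
-- A's FASTA loop step: state = (sequences, current_seq)
def pvStepA (st : List String × List String) (line : String) : List String × List String :=
  if PySem.Str.startswith line ">" then
    (if st.2.isEmpty then st.1 else st.1 ++ [PySem.Str.join "" st.2], [])
  else
    (st.1, st.2 ++ [PySem.Str.strip line])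

-- A's tabular loop step
def pvTabStep (seqs : List String) (line : String) : List String :=
  let parts := (PySem.Str.split? (PySem.Str.strip line) "\t").getD []
  if 2 ≤ parts.length then
    let seq := PySem.Str.replace ((PySem.List.pyGet? parts (-1)).getD "") "-" ""
    if seq = "" then seqs else seqs ++ [seq]
  else seqs

def parse_blast_results (blast_output : String) : List String :=
  if PySem.Str.strip blast_output = "" then []
  else
    let lines := (PySem.Str.split? (PySem.Str.strip blast_output) "\n").getD []
    if PySem.Str.startswith (PySem.Str.strip blast_output) ">" then
      let st := lines.foldl pvStepA ([], [])
      if st.2.isEmpty then st.1 else st.1 ++ [PySem.Str.join "" st.2]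
    else
      lines.foldl pvTabStep []

-- ===== PORT B =====
def parse_blast_results_alt (blast_output : String) : List String :=
  let text := PySem.Str.strip blast_output
  if text = "" then []
  else if PySem.Str.startswith text ">" then
    -- records delimited by splitting the raw text at newline-then-'>' 
    let records := (PySem.Str.split? text "\n>").getD []
    (records.filter (fun r => PySem.Str.isIn "\n" r)).map
      (fun r => PySem.Str.join ""
        ((PySem.List.slice ((PySem.Str.split? r "\n").getD []) (some 1) none).map
          (fun l => PySem.Str.strip l)))
  else
    let rows := ((PySem.Str.split? text "\n").getD []).map
      (fun line => (PySem.Str.split? (PySem.Str.strip line) "\t").getD [])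
    ((rows.filter (fun p => 2 ≤ p.length)).map
      (fun p => PySem.Str.replace ((PySem.List.pyGet? p (-1)).getD "") "-" "")).filter
        (fun s => !(s == ""))

-- ===== PRECONDITION & SPEC =====
def Spec_parse_blast_results (blast_output : String) (out : List String) : Prop := out = parse_blast_results_alt blast_output
instance (blast_output : String) (out : List String) : Decidable (Spec_parse_blast_results blast_output out) := by unfold Spec_parse_blast_results; infer_instance

-- ===== CLAIM (what is proved, stated in full; the proofs are below) =====
def Claim_equal_parse_blast_results : Prop := ∀ (blast_output : String), Dom_parse_blast_results blast_output → Spec_parse_blast_results blast_output (parse_blast_results blast_output)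

-- ===== LEMMAS AND PROOFS =====

-- does a line start with '>' ?
def pvHdr (y : List Char) : Bool := PySem.Chars.startswith y ['>']

def pvBody (l : String) : Bool := !(PySem.Str.startswith l ">")

-- characterization of A's FASTA branch: per header, join the following run of body lines
def pvFastaRecords : List String → List String
  | [] => []
  | _ :: rest =>
      let body := (rest.takeWhile pvBody).map PySem.Str.strip
      (if body.isEmpty then [] else [PySem.Str.join "" body]) ++
        pvFastaRecords (rest.dropWhile pvBody)
termination_by l => l.length
decreasing_by
  simp only [List.length_cons]
  exact Nat.lt_succ_of_le (List.length_dropWhile_le _ _)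

-- the same function on char-level lines
def pvFastaRecordsC : List (List Char) → List (List Char)
  | [] => []
  | _ :: rest =>
      let body := (rest.takeWhile (fun y => !pvHdr y)).map PySem.Chars.strip
      (if body.isEmpty then [] else [PySem.Chars.join [] body]) ++
        pvFastaRecordsC (rest.dropWhile (fun y => !pvHdr y))
termination_by l => l.length
decreasing_by
  simp only [List.length_cons]
  exact Nat.lt_succ_of_le (List.length_dropWhile_le _ _)

-- regrouping of the "\n"-split lines into the "\n>"-split records
mutual
def pvRegroup : List (List Char) → List (List Char)
  | [] => []
  | x :: xs =>
      List.intercalate ['\n'] (x :: xs.takeWhile (fun y => !pvHdr y)) ::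
        pvRegroupRest (xs.dropWhile (fun y => !pvHdr y))
termination_by l => (l.length, 0)
decreasing_by
  refine Prod.Lex.left _ _ ?_
  simp only [List.length_cons]
  exact Nat.lt_succ_of_le (List.length_dropWhile_le _ _)

def pvRegroupRest : List (List Char) → List (List Char)
  | [] => []
  | y :: ys => pvRegroup (y.drop 1 :: ys)
termination_by l => (l.length, 1)
decreasing_by
  simp only [List.length_cons]
  exact Prod.Lex.right _ Nat.zero_lt_one
end

-- B's FASTA comprehension at char level
def pvEmitPipe (rs : List (List Char)) : List (List Char) :=
  (rs.filter (fun r => PySem.Chars.isIn ['\n'] r)).map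
    (fun r => PySem.Chars.join [] (((PySem.Chars.splitOn r ['\n']).drop 1).map PySem.Chars.strip))

def pvFlush (cur : List String) : List String :=
  if cur.isEmpty then [] else [PySem.Str.join "" cur]

-- A's loop re-expressed as an emitting recursion
def pvEmitA : List String → List String → List String
  | [], cur => pvFlush cur
  | l :: ls, cur =>
      if PySem.Str.startswith l ">" then pvFlush cur ++ pvEmitA ls []
      else pvEmitA ls (cur ++ [PySem.Str.strip l])

lemma pvL1 (ls seqs cur : List String) :
    (let st := ls.foldl pvStepA (seqs, cur);
     if st.2.isEmpty then st.1 else st.1 ++ [PySem.Str.join "" st.2]) = seqs ++ pvEmitA ls cur := by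
  induction ls generalizing seqs cur with
  | nil =>
    simp only [List.foldl_nil, pvEmitA, pvFlush]
    split_ifs <;> simp
  | cons l ls ih =>
    simp only [List.foldl_cons, pvEmitA]
    rw [ih]
    cases h : PySem.Str.startswith l ">" with
    | true =>
      simp only [pvStepA, h, pvFlush]
      split_ifs <;> simp
    | false =>
      simp only [pvStepA, h]
      rfl

lemma pvL2 (ls cur : List String) :
    pvEmitA ls cur =
      pvFlush (cur ++ (ls.takeWhile pvBody).map PySem.Str.strip) ++
        pvFastaRecords (ls.dropWhile pvBody) := by
  induction ls generalizing cur with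
  | nil => simp [pvEmitA, pvFastaRecords]
  | cons l ls ih =>
    cases hx : PySem.Str.startswith l ">" with
    | true =>
      have hb : pvBody l = false := by unfold pvBody; rw [hx]; rfl
      have h1 : pvEmitA (l :: ls) cur = pvFlush cur ++ pvEmitA ls [] := by
        simp only [pvEmitA, hx, if_true]
      rw [h1, ih, List.takeWhile_cons, List.dropWhile_cons, hb]
      simp [pvFastaRecords, pvFlush]
    | false =>
      have hb : pvBody l = true := by unfold pvBody; rw [hx]; rfl
      have h1 : pvEmitA (l :: ls) cur = pvEmitA ls (cur ++ [PySem.Str.strip l]) := by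
        simp only [pvEmitA, hx]
        rfl
      rw [h1, ih, List.takeWhile_cons, List.dropWhile_cons, hb]
      simp

-- one-step unfoldings of PySem.Chars.splitOn.go (each holds by rfl)
lemma pvGo_zero (sep l cur : List Char) (acc : List (List Char)) :
    PySem.Chars.splitOn.go sep 0 l cur acc = ((cur.reverse ++ l) :: acc).reverse := rfl

lemma pvGo_nil (sep cur : List Char) (f : Nat) (acc : List (List Char)) :
    PySem.Chars.splitOn.go sep (f + 1) [] cur acc = (cur.reverse :: acc).reverse := rfl

lemma pvGo_cons (sep cur : List Char) (c : Char) (rest : List Char) (f : Nat) (acc : List (List Char)) :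
    PySem.Chars.splitOn.go sep (f + 1) (c :: rest) cur acc =
      if sep.isPrefixOf (c :: rest) then
        PySem.Chars.splitOn.go sep f (List.drop sep.length (c :: rest)) [] (cur.reverse :: acc)
      else PySem.Chars.splitOn.go sep f rest (c :: cur) acc := rfl

-- the accumulator factors out of go
lemma pvGo_acc (sep : List Char) : ∀ (f : Nat) (l cur : List Char) (acc : List (List Char)),
    PySem.Chars.splitOn.go sep f l cur acc = acc.reverse ++ PySem.Chars.splitOn.go sep f l cur [] := by
  intro f
  induction f with
  | zero => intro l cur acc; rw [pvGo_zero, pvGo_zero]; simp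
  | succ f ih =>
    intro l cur acc
    cases l with
    | nil => rw [pvGo_nil, pvGo_nil]; simp
    | cons c rest =>
      rw [pvGo_cons, pvGo_cons]
      by_cases h : sep.isPrefixOf (c :: rest)
      · rw [if_pos h, if_pos h, ih _ _ (cur.reverse :: acc), ih _ _ [cur.reverse]]; simp
      · rw [if_neg h, if_neg h, ih _ _ acc]

-- the current piece factors out of go as a head modification
lemma pvGo_cur (sep : List Char) : ∀ (f : Nat) (l cur : List Char),
    PySem.Chars.splitOn.go sep f l cur [] =
      (PySem.Chars.splitOn.go sep f l [] []).modifyHead (cur.reverse ++ ·) := by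
  intro f
  induction f with
  | zero => intro l cur; rw [pvGo_zero, pvGo_zero]; simp
  | succ f ih =>
    intro l cur
    cases l with
    | nil => rw [pvGo_nil, pvGo_nil]; simp
    | cons c rest =>
      rw [pvGo_cons, pvGo_cons]
      by_cases h : sep.isPrefixOf (c :: rest)
      · rw [if_pos h, if_pos h]
        simp only [List.reverse_nil]
        rw [pvGo_acc _ _ _ _ [cur.reverse], pvGo_acc _ _ _ _ [[]]]
        simp
      · rw [if_neg h, if_neg h, ih _ (c :: cur), ih _ [c], List.modifyHead_modifyHead]
        simp [Function.comp_def]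

-- go ignores fuel once the fuel exceeds the input length
lemma pvGo_fuel (sep : List Char) (hs : sep ≠ []) :
    ∀ (n : Nat) (l cur : List Char) (acc : List (List Char)) (f₁ f₂ : Nat),
      l.length ≤ n → l.length < f₁ → l.length < f₂ →
      PySem.Chars.splitOn.go sep f₁ l cur acc = PySem.Chars.splitOn.go sep f₂ l cur acc := by
  intro n
  induction n with
  | zero =>
    intro l cur acc f₁ f₂ hn h1 h2
    obtain rfl : l = [] := List.length_eq_zero_iff.mp (Nat.le_zero.mp hn)
    cases f₁ with
    | zero => omega
    | succ f₁' =>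
      cases f₂ with
      | zero => omega
      | succ f₂' => rw [pvGo_nil, pvGo_nil]
  | succ m ih =>
    intro l cur acc f₁ f₂ hn h1 h2
    cases f₁ with
    | zero => omega
    | succ f₁' =>
      cases f₂ with
      | zero => omega
      | succ f₂' =>
        cases l with
        | nil => rw [pvGo_nil, pvGo_nil]
        | cons c rest =>
          simp only [List.length_cons] at hn h1 h2
          have hsl : 1 ≤ sep.length := by
            cases sep with
            | nil => exact absurd rfl hs
            | cons a b => simp
          rw [pvGo_cons, pvGo_cons]
          by_cases h : sep.isPrefixOf (c :: rest)
          · rw [if_pos h, if_pos h]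
            apply ih
            · simp only [List.length_drop, List.length_cons]; omega
            · simp only [List.length_drop, List.length_cons]; omega
            · simp only [List.length_drop, List.length_cons]; omega
          · rw [if_neg h, if_neg h]
            apply ih <;> omega

lemma pvSplit_match (sep : List Char) (hs : sep ≠ []) (c : Char) (rest : List Char)
    (h : sep.isPrefixOf (c :: rest) = true) :
    PySem.Chars.splitOn (c :: rest) sep =
      [] :: PySem.Chars.splitOn (List.drop sep.length (c :: rest)) sep := by
  have hsl : 1 ≤ sep.length := by
    cases sep with
    | nil => exact absurd rfl hs
    | cons a b => simp
  have h0 : PySem.Chars.splitOn (c :: rest) sep =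
      PySem.Chars.splitOn.go sep (rest.length + 1 + 1) (c :: rest) [] [] := rfl
  have h1 : PySem.Chars.splitOn (List.drop sep.length (c :: rest)) sep =
      PySem.Chars.splitOn.go sep ((List.drop sep.length (c :: rest)).length + 1)
        (List.drop sep.length (c :: rest)) [] [] := rfl
  have hfl : (List.drop sep.length (c :: rest)).length < rest.length + 1 := by
    simp only [List.length_drop, List.length_cons]; omega
  rw [h0, pvGo_cons, if_pos h, pvGo_acc, h1,
    pvGo_fuel sep hs (List.drop sep.length (c :: rest)).length _ [] [] (rest.length + 1)
      ((List.drop sep.length (c :: rest)).length + 1) le_rfl hfl (Nat.lt_succ_self _)]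
  simp

lemma pvSplit_nonmatch (sep : List Char) (c : Char) (rest : List Char)
    (h : ¬ sep.isPrefixOf (c :: rest) = true) :
    PySem.Chars.splitOn (c :: rest) sep = (PySem.Chars.splitOn rest sep).modifyHead (c :: ·) := by
  have h0 : PySem.Chars.splitOn (c :: rest) sep =
      PySem.Chars.splitOn.go sep (rest.length + 1 + 1) (c :: rest) [] [] := rfl
  rw [h0, pvGo_cons, if_neg h, pvGo_cur]
  rfl

lemma pvGo_ne_nil (sep : List Char) : ∀ (f : Nat) (l cur : List Char) (acc : List (List Char)),
    PySem.Chars.splitOn.go sep f l cur acc ≠ [] := by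
  intro f
  induction f with
  | zero => intro l cur acc; rw [pvGo_zero]; simp
  | succ f ih =>
    intro l cur acc
    cases l with
    | nil => rw [pvGo_nil]; simp
    | cons c rest =>
      rw [pvGo_cons]
      by_cases h : sep.isPrefixOf (c :: rest)
      · rw [if_pos h]; exact ih _ _ _
      · rw [if_neg h]; exact ih _ _ _

lemma pvSplit_ne_nil (l sep : List Char) : PySem.Chars.splitOn l sep ≠ [] :=
  pvGo_ne_nil sep _ l [] []

lemma pvPrefix_nl (c : Char) (rest : List Char) :
    (['\n'] : List Char).isPrefixOf (c :: rest) = (c == '\n') := by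
  simp [List.isPrefixOf, Bool.and_comm, eq_comm]

-- pieces of a "\n"-split contain no '\n'
lemma pvNoNl : ∀ (n : Nat) (l : List Char), l.length ≤ n →
    ∀ p ∈ PySem.Chars.splitOn l ['\n'], '\n' ∉ p := by
  intro n
  induction n with
  | zero =>
    intro l hn p hp
    obtain rfl : l = [] := List.length_eq_zero_iff.mp (Nat.le_zero.mp hn)
    have : p = [] := by
      have h0 : PySem.Chars.splitOn ([] : List Char) ['\n'] = [[]] := rfl
      rw [h0] at hp; simpa using hp
    simp [this]
  | succ m ih =>
    intro l hn p hp
    cases l with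
    | nil =>
      have h0 : PySem.Chars.splitOn ([] : List Char) ['\n'] = [[]] := rfl
      rw [h0] at hp
      have : p = [] := by simpa using hp
      simp [this]
    | cons c rest =>
      simp only [List.length_cons] at hn
      by_cases hc : c = '\n'
      · subst hc
        rw [pvSplit_match ['\n'] (by simp) _ _ (by rw [pvPrefix_nl]; simp)] at hp
        simp only [List.length_singleton, List.drop_one, List.tail_cons] at hp
        rcases List.mem_cons.mp hp with h | h
        · simp [h]
        · exact ih rest (by omega) p h
      · rw [pvSplit_nonmatch ['\n'] _ _ (by rw [pvPrefix_nl]; simp [hc])] at hp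
        obtain ⟨h, tl, hht⟩ := List.exists_cons_of_ne_nil (pvSplit_ne_nil rest ['\n'])
        rw [hht] at hp
        simp only [List.modifyHead_cons] at hp
        rcases List.mem_cons.mp hp with h1 | h1
        · subst h1
          intro hmem
          rcases List.mem_cons.mp hmem with h2 | h2
          · exact hc h2.symm
          · exact ih rest (by omega) h (by rw [hht]; exact List.mem_cons_self) h2
        · exact ih rest (by omega) p (by rw [hht]; exact List.mem_cons_of_mem _ h1)

lemma pvSplit_singleton (a : List Char) (ha : '\n' ∉ a) :
    PySem.Chars.splitOn a ['\n'] = [a] := by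
  induction a with
  | nil => rfl
  | cons c a' ih =>
    have hc : ¬ c = '\n' := fun h => ha (by simp [h])
    rw [pvSplit_nonmatch ['\n'] _ _ (by rw [pvPrefix_nl]; simp [hc])]
    rw [ih (fun h => ha (List.mem_cons_of_mem _ h))]
    rfl

lemma pvSplit_append (a m : List Char) (ha : '\n' ∉ a) :
    PySem.Chars.splitOn (a ++ '\n' :: m) ['\n'] = a :: PySem.Chars.splitOn m ['\n'] := by
  induction a with
  | nil =>
    rw [List.nil_append, pvSplit_match ['\n'] (by simp) _ _ (by rw [pvPrefix_nl]; simp)]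
    simp
  | cons c a' ih =>
    have hc : ¬ c = '\n' := fun h => ha (by simp [h])
    rw [List.cons_append, pvSplit_nonmatch ['\n'] _ _ (by rw [pvPrefix_nl]; simp [hc])]
    rw [ih (fun h => ha (List.mem_cons_of_mem _ h))]
    rfl

lemma pvIntercalate_cons₂ (a b : List Char) (ts : List (List Char)) :
    List.intercalate ['\n'] (a :: b :: ts) = a ++ '\n' :: List.intercalate ['\n'] (b :: ts) := by
  simp [List.intercalate, List.intersperse]

lemma pvSplit_intercalate : ∀ (L : List (List Char)) (b : List Char),
    (∀ p ∈ b :: L, '\n' ∉ p) →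
    PySem.Chars.splitOn (List.intercalate ['\n'] (b :: L)) ['\n'] = b :: L := by
  intro L
  induction L with
  | nil =>
    intro b hb
    have : List.intercalate ['\n'] [b] = b := by simp [List.intercalate]
    rw [this, pvSplit_singleton b (hb b List.mem_cons_self)]
  | cons x L' ih =>
    intro b hb
    rw [pvIntercalate_cons₂, pvSplit_append _ _ (hb b List.mem_cons_self)]
    rw [ih x (fun p hp => hb p (List.mem_cons_of_mem _ hp))]

lemma pvMemNl_intercalate (x : List Char) (run : List (List Char)) (hx : '\n' ∉ x) :
    '\n' ∈ List.intercalate ['\n'] (x :: run) ↔ run ≠ [] := by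
  cases run with
  | nil => simp [List.intercalate, hx]
  | cons y ys =>
    rw [pvIntercalate_cons₂]
    simp

-- pvRegroup head-prepending lemmas
lemma pvRegroup_cons_cons (c : Char) (h : List Char) (tl : List (List Char)) :
    pvRegroup ((c :: h) :: tl) = (pvRegroup (h :: tl)).modifyHead (c :: ·) := by
  rw [pvRegroup, pvRegroup]
  cases htl : tl.takeWhile (fun y => !pvHdr y) with
  | nil => simp [List.intercalate]
  | cons z zs => simp [pvIntercalate_cons₂]

lemma pvRegroup_nil_cons (h : List Char) (tl : List (List Char)) (hh : pvHdr h = false) :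
    pvRegroup ([] :: h :: tl) = (pvRegroup (h :: tl)).modifyHead ('\n' :: ·) := by
  rw [pvRegroup, pvRegroup]
  rw [List.takeWhile_cons_of_pos (by simp [hh]), List.dropWhile_cons_of_pos (by simp [hh])]
  rw [pvIntercalate_cons₂]
  simp

lemma pvRegroup_nil_hdr (y : List Char) (tl : List (List Char)) (hy : pvHdr y = true) :
    pvRegroup ([] :: y :: tl) = [] :: pvRegroup (y.drop 1 :: tl) := by
  rw [pvRegroup]
  rw [List.takeWhile_cons_of_neg (by simp [hy]), List.dropWhile_cons_of_neg (by simp [hy])]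
  rw [pvRegroupRest]
  simp [List.intercalate]

-- the head of a "\n"-split of a string not starting with '>' is not a header line
lemma pvSplit1_head (t : List Char) (ht : t.head? ≠ some '>') :
    ∃ h tl, PySem.Chars.splitOn t ['\n'] = h :: tl ∧ pvHdr h = false := by
  cases t with
  | nil => exact ⟨[], [], rfl, rfl⟩
  | cons d t' =>
    by_cases hd : d = '\n'
    · subst hd
      refine ⟨[], PySem.Chars.splitOn t' ['\n'], ?_, rfl⟩
      rw [pvSplit_match ['\n'] (by simp) _ _ (by rw [pvPrefix_nl]; simp)]
      simp
    · obtain ⟨h, tl, hht⟩ := List.exists_cons_of_ne_nil (pvSplit_ne_nil t' ['\n'])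
      refine ⟨d :: h, tl, ?_, ?_⟩
      · rw [pvSplit_nonmatch ['\n'] _ _ (by rw [pvPrefix_nl]; simp [hd]), hht]
        rfl
      · have hd' : ¬ d = '>' := fun h2 => ht (by simp [h2])
        simp only [pvHdr, PySem.Chars.startswith, List.isPrefixOf, Bool.and_eq_false_iff]
        left
        simpa using fun h2 => hd' h2.symm

lemma pvRegroup_singleton (x : List Char) : pvRegroup [x] = [x] := by
  rw [pvRegroup]
  simp [pvRegroupRest, List.intercalate]

-- MAIN: the "\n>"-split is the regrouping of the "\n"-split
lemma pvR : ∀ (n : Nat) (l : List Char), l.length ≤ n →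
    PySem.Chars.splitOn l ['\n', '>'] = pvRegroup (PySem.Chars.splitOn l ['\n']) := by
  intro n
  induction n with
  | zero =>
    intro l hn
    obtain rfl : l = [] := List.length_eq_zero_iff.mp (Nat.le_zero.mp hn)
    have e1 : PySem.Chars.splitOn ([] : List Char) ['\n', '>'] = [[]] := rfl
    have e2 : PySem.Chars.splitOn ([] : List Char) ['\n'] = [[]] := rfl
    rw [e1, e2, pvRegroup_singleton]
  | succ m ih =>
    intro l hn
    cases l with
    | nil =>
      have e1 : PySem.Chars.splitOn ([] : List Char) ['\n', '>'] = [[]] := rfl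
      have e2 : PySem.Chars.splitOn ([] : List Char) ['\n'] = [[]] := rfl
      rw [e1, e2, pvRegroup_singleton]
    | cons c rest =>
      simp only [List.length_cons] at hn
      by_cases hc : c = '\n'
      · subst hc
        cases rest with
        | nil =>
          rw [pvSplit_nonmatch ['\n', '>'] _ _ (by simp [List.isPrefixOf])]
          rw [pvSplit_match ['\n'] (by simp) _ _ (by rw [pvPrefix_nl]; simp)]
          have e2 : PySem.Chars.splitOn ([] : List Char) ['\n'] = [[]] := rfl
          simp only [List.length_singleton, List.drop_one, List.tail_cons, e2]
          rw [pvRegroup_nil_cons [] [] (by rfl), pvRegroup_singleton]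
          rfl
        | cons d t =>
          by_cases hd : d = '>'
          · subst hd
            rw [pvSplit_match ['\n', '>'] (by simp) _ _ (by simp [List.isPrefixOf])]
            rw [pvSplit_match ['\n'] (by simp) _ _ (by rw [pvPrefix_nl]; simp)]
            rw [show List.drop (['\n', '>'] : List Char).length ('\n' :: '>' :: t) = t from rfl]
            rw [show List.drop (['\n'] : List Char).length ('\n' :: '>' :: t) = '>' :: t from rfl]
            rw [pvSplit_nonmatch ['\n'] _ _ (by rw [pvPrefix_nl]; simp)]
            obtain ⟨h, tl, hht⟩ := List.exists_cons_of_ne_nil (pvSplit_ne_nil t ['\n'])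
            rw [hht]
            simp only [List.modifyHead_cons]
            rw [pvRegroup_nil_hdr ('>' :: h) tl (by simp [pvHdr, PySem.Chars.startswith, List.isPrefixOf])]
            simp only [List.drop_one, List.tail_cons]
            rw [← hht, ← ih t (by simp only [List.length_cons] at hn; omega)]
          · -- "\n" matches, "\n>" does not
            rw [pvSplit_nonmatch ['\n', '>'] _ _
              (by simp [List.isPrefixOf]; exact fun h2 => hd h2.symm)]
            rw [pvSplit_match ['\n'] (by simp) _ _ (by rw [pvPrefix_nl]; simp)]
            simp only [List.length_singleton, List.drop_one, List.tail_cons]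
            obtain ⟨h, tl, hht, hh⟩ := pvSplit1_head (d :: t) (by simp [hd])
            rw [hht, pvRegroup_nil_cons h tl hh, ← hht]
            rw [ih (d :: t) (by omega)]
      · -- neither separator matches
        rw [pvSplit_nonmatch ['\n', '>'] _ _
              (by simp [List.isPrefixOf]; exact fun h2 => (hc h2.symm).elim)]
        rw [pvSplit_nonmatch ['\n'] _ _ (by rw [pvPrefix_nl]; simp [hc])]
        obtain ⟨h, tl, hht⟩ := List.exists_cons_of_ne_nil (pvSplit_ne_nil rest ['\n'])
        rw [hht]
        simp only [List.modifyHead_cons]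
        rw [pvRegroup_cons_cons, ← hht, ih rest (by omega)]

lemma pvFasta_eq (l : String) (ls : List String) (hl : PySem.Str.startswith l ">" = true) :
    (let st := (l :: ls).foldl pvStepA ([], []);
     if st.2.isEmpty then st.1 else st.1 ++ [PySem.Str.join "" st.2]) = pvFastaRecords (l :: ls) := by
  rw [pvL1]
  have h1 : pvEmitA (l :: ls) [] = pvEmitA ls [] := by
    simp only [pvEmitA, hl, if_true]
    simp [pvFlush]
  rw [List.nil_append, h1, pvL2]
  simp [pvFastaRecords, pvFlush]

lemma pvIsIn_nl (r : List Char) : PySem.Chars.isIn ['\n'] r = true ↔ '\n' ∈ r := by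
  rw [PySem.Chars.isIn_iff_infix]
  constructor
  · intro h
    exact h.subset List.mem_cons_self
  · intro h
    obtain ⟨u, v, rfl⟩ := List.append_of_mem h
    exact ⟨u, v, by simp⟩

lemma pvEmitPipe_cons (r : List Char) (rs : List (List Char)) :
    pvEmitPipe (r :: rs) =
      (if PySem.Chars.isIn ['\n'] r then
        [PySem.Chars.join [] (((PySem.Chars.splitOn r ['\n']).drop 1).map PySem.Chars.strip)]
       else []) ++ pvEmitPipe rs := by
  simp only [pvEmitPipe, List.filter_cons]
  split_ifs <;> simp

lemma pvFRC_tail (a b : List Char) (l : List (List Char)) :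
    pvFastaRecordsC (a :: l) = pvFastaRecordsC (b :: l) := by
  rw [pvFastaRecordsC, pvFastaRecordsC]

-- B's record comprehension over the regrouped lines is A's per-header record function
lemma pvF2 : ∀ (n : Nat) (x : List Char) (xs : List (List Char)), xs.length ≤ n →
    (∀ p ∈ x :: xs, '\n' ∉ p) →
    pvEmitPipe (pvRegroup (x :: xs)) = pvFastaRecordsC (x :: xs) := by
  intro n
  induction n with
  | zero =>
    intro x xs hn hfree
    obtain rfl : xs = [] := List.length_eq_zero_iff.mp (Nat.le_zero.mp hn)
    rw [pvRegroup]
    simp only [List.takeWhile_nil, List.dropWhile_nil, pvRegroupRest]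
    rw [pvEmitPipe_cons]
    have hx : '\n' ∉ x := hfree x List.mem_cons_self
    have hno : PySem.Chars.isIn ['\n'] (List.intercalate ['\n'] [x]) = false := by
      rw [Bool.eq_false_iff]
      intro hb
      exact ((pvMemNl_intercalate x [] hx).mp ((pvIsIn_nl _).mp hb)) rfl
    rw [hno]
    rw [pvFastaRecordsC]
    simp [pvEmitPipe, pvFastaRecordsC]
  | succ m ih =>
    intro x xs hn hfree
    have hx : '\n' ∉ x := hfree x List.mem_cons_self
    have hrunfree : ∀ p ∈ x :: xs.takeWhile (fun y => !pvHdr y), '\n' ∉ p := by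
      intro p hp
      rcases List.mem_cons.mp hp with h | h
      · exact h ▸ hx
      · exact hfree p (List.mem_cons_of_mem _ ((xs.takeWhile_sublist _).subset h))
    have hsplit : PySem.Chars.splitOn
        (List.intercalate ['\n'] (x :: xs.takeWhile (fun y => !pvHdr y))) ['\n'] =
        x :: xs.takeWhile (fun y => !pvHdr y) :=
      pvSplit_intercalate _ x hrunfree
    rw [pvRegroup, pvEmitPipe_cons, hsplit]
    have hcont : pvEmitPipe (pvRegroupRest (xs.dropWhile (fun y => !pvHdr y))) =
        pvFastaRecordsC (xs.dropWhile (fun y => !pvHdr y)) := by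
      cases hrest : xs.dropWhile (fun y => !pvHdr y) with
      | nil => simp [pvRegroupRest, pvEmitPipe, pvFastaRecordsC]
      | cons y ys =>
        rw [pvRegroupRest]
        have hsub : ∀ p ∈ y :: ys, p ∈ xs := fun p hp =>
          (xs.dropWhile_sublist _).subset (hrest ▸ hp)
        have hlen : ys.length ≤ m := by
          have := (xs.dropWhile_sublist (fun y => !pvHdr y)).length_le
          rw [hrest] at this
          simp only [List.length_cons] at this
          omega
        have hfree' : ∀ p ∈ y.drop 1 :: ys, '\n' ∉ p := by
          intro p hp
          rcases List.mem_cons.mp hp with h | h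
          · subst h
            intro hm
            exact hfree y (List.mem_cons_of_mem _ (hsub y List.mem_cons_self))
              (List.mem_of_mem_drop hm)
          · exact hfree p (List.mem_cons_of_mem _ (hsub p (List.mem_cons_of_mem _ h)))
        rw [ih (y.drop 1) ys hlen hfree', pvFRC_tail (y.drop 1) y ys]
    rw [hcont]
    rw [pvFastaRecordsC]
    cases hb : PySem.Chars.isIn ['\n'] (List.intercalate ['\n'] (x :: xs.takeWhile (fun y => !pvHdr y))) with
    | true =>
      have hrun : xs.takeWhile (fun y => !pvHdr y) ≠ [] :=
        (pvMemNl_intercalate x _ hx).mp ((pvIsIn_nl _).mp hb)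
      simp [hrun]
    | false =>
      have hrun : xs.takeWhile (fun y => !pvHdr y) = [] := by
        by_contra hne
        rw [(pvIsIn_nl _).mpr ((pvMemNl_intercalate x _ hx).mpr hne)] at hb
        exact Bool.true_eq_false.mp hb
      simp [hrun]

lemma pvBody_ofList (y : List Char) : pvBody (String.ofList y) = !pvHdr y := by
  simp [pvBody, pvHdr]

lemma pvStrip_ofList (y : List Char) :
    PySem.Str.strip (String.ofList y) = String.ofList (PySem.Chars.strip y) :=
  String.toList_inj.mp (by simp)

lemma pvJoin_ofList (bs : List (List Char)) :
    PySem.Str.join "" (bs.map String.ofList) = String.ofList (PySem.Chars.join [] bs) :=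
  String.toList_inj.mp (by simp [PySem.Str.join, Function.comp_def])

-- the String-level record function is the char-level one
lemma pvFR_map : ∀ (n : Nat) (L : List (List Char)), L.length ≤ n →
    pvFastaRecords (L.map String.ofList) = (pvFastaRecordsC L).map String.ofList := by
  intro n
  induction n with
  | zero =>
    intro L hn
    obtain rfl : L = [] := List.length_eq_zero_iff.mp (Nat.le_zero.mp hn)
    simp [pvFastaRecords, pvFastaRecordsC]
  | succ m ih =>
    intro L hn
    cases L with
    | nil => simp [pvFastaRecords, pvFastaRecordsC]
    | cons x rest =>
      rw [List.map_cons, pvFastaRecords, pvFastaRecordsC]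
      have hq : (fun y => pvBody (String.ofList y)) = (fun y => !pvHdr y) :=
        funext pvBody_ofList
      have htk : (rest.map String.ofList).takeWhile pvBody =
          (rest.takeWhile (fun y => !pvHdr y)).map String.ofList := by
        rw [List.takeWhile_map]
        simp only [Function.comp_def, pvBody_ofList]
      have hdw : (rest.map String.ofList).dropWhile pvBody =
          (rest.dropWhile (fun y => !pvHdr y)).map String.ofList := by
        rw [List.dropWhile_map]
        simp only [Function.comp_def, pvBody_ofList]
      rw [htk, hdw]
      have hbody : ((rest.takeWhile (fun y => !pvHdr y)).map String.ofList).map PySem.Str.strip =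
          ((rest.takeWhile (fun y => !pvHdr y)).map PySem.Chars.strip).map String.ofList := by
        simp only [List.map_map, Function.comp_def, pvStrip_ofList]
      rw [hbody]
      have hlen : (rest.dropWhile (fun y => !pvHdr y)).length ≤ m := by
        have := (rest.dropWhile_sublist (fun y => !pvHdr y)).length_le
        simp only [List.length_cons] at hn
        omega
      rw [ih _ hlen]
      cases he : (rest.takeWhile (fun y => !pvHdr y)).map PySem.Chars.strip with
      | nil => simp
      | cons b bs =>
        have hj := pvJoin_ofList (b :: bs)
        simp only [List.map_cons] at hj
        simp [hj]

-- B's String-level comprehension is pvEmitPipe under ofList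
lemma pvPipeB (rs : List (List Char)) :
    ((rs.map String.ofList).filter (fun r => PySem.Str.isIn "\n" r)).map
      (fun r => PySem.Str.join ""
        ((PySem.List.slice ((PySem.Str.split? r "\n").getD []) (some 1) none).map
          (fun l => PySem.Str.strip l)))
    = (pvEmitPipe rs).map String.ofList := by
  rw [List.filter_map, List.map_map, pvEmitPipe, List.map_map]
  have hp : ∀ r : List Char,
      (PySem.Str.isIn "\n" ∘ String.ofList) r = PySem.Chars.isIn ['\n'] r := by
    intro r
    simp [PySem.Str.isIn]
  rw [List.filter_congr (fun r _ => hp r)]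
  apply List.map_congr_left
  intro r _
  simp only [Function.comp_def]
  have hsplit : (PySem.Str.split? (String.ofList r) "\n").getD [] =
      (PySem.Chars.splitOn r ['\n']).map String.ofList := by
    simp [PySem.Str.split?, PySem.Chars.split?]
  rw [hsplit]
  rw [show ∀ L : List String, PySem.List.slice L (some 1) none = L.drop 1 from
    fun L => by simp [PySem.List.slice_from]]
  rw [← List.map_drop]
  have : ((PySem.Chars.splitOn r ['\n']).drop 1).map (PySem.Str.strip ∘ String.ofList) =
      (((PySem.Chars.splitOn r ['\n']).drop 1).map PySem.Chars.strip).map String.ofList := by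
    simp only [List.map_map, Function.comp_def, pvStrip_ofList]
  rw [List.map_map, this, pvJoin_ofList]

-- the tabular loop is the staged filter/map/filter pipeline
lemma pvTab : ∀ (lines : List String) (acc : List String),
    lines.foldl pvTabStep acc = acc ++
      (((lines.map (fun line => (PySem.Str.split? (PySem.Str.strip line) "\t").getD [])).filter
        (fun p => 2 ≤ p.length)).map
        (fun p => PySem.Str.replace ((PySem.List.pyGet? p (-1)).getD "") "-" "")).filter
          (fun s => !(s == "")) := by
  intro lines
  induction lines with
  | nil => intro acc; simp
  | cons l ls ih =>
    intro acc
    rw [List.foldl_cons, ih]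
    simp only [List.map_cons, List.filter_cons]
    by_cases h1 : 2 ≤ ((PySem.Str.split? (PySem.Str.strip l) "\t").getD []).length
    · simp only [pvTabStep, h1, decide_true, if_true, List.map_cons, List.filter_cons]
      by_cases h2 : PySem.Str.replace ((PySem.List.pyGet? ((PySem.Str.split? (PySem.Str.strip l) "\t").getD []) (-1)).getD "") "-" "" = ""
      · simp [h2]
      · simp [h2]
    · simp only [pvTabStep, h1, decide_false]
      simp

-- ===== VERDICT (by name: the statement is the Claim_ definition above) =====
theorem parse_blast_results_spec : Claim_equal_parse_blast_results := by
  intro s _hd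
  unfold Spec_parse_blast_results parse_blast_results parse_blast_results_alt
  by_cases h0 : PySem.Str.strip s = ""
  · simp [h0]
  · simp only [h0, if_false]
    cases hf : PySem.Str.startswith (PySem.Str.strip s) ">" with
    | false =>
      simp only [Bool.false_eq_true, if_false]
      rw [pvTab _ []]
      rw [List.nil_append]
    | true =>
      simp only [if_true]
      -- the stripped text begins with '>'
      have hc : PySem.Chars.startswith (PySem.Str.strip s).toList ['>'] = true := by simpa using hf
      obtain ⟨rest, hrest⟩ : ∃ rest, (PySem.Str.strip s).toList = '>' :: rest := by
        cases htl : (PySem.Str.strip s).toList with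
        | nil => rw [htl] at hc; simp [PySem.Chars.startswith, List.isPrefixOf] at hc
        | cons c r =>
          rw [htl] at hc
          simp [PySem.Chars.startswith, List.isPrefixOf] at hc
          exact ⟨r, by rw [hc]⟩
      have hlines : (PySem.Str.split? (PySem.Str.strip s) "\n").getD [] =
          (PySem.Chars.splitOn (PySem.Str.strip s).toList ['\n']).map String.ofList := by
        simp [PySem.Str.split?, PySem.Chars.split?]
      have hrecs : (PySem.Str.split? (PySem.Str.strip s) "\n>").getD [] =
          (PySem.Chars.splitOn (PySem.Str.strip s).toList ['\n', '>']).map String.ofList := by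
        simp [PySem.Str.split?, PySem.Chars.split?]
      -- shape of the newline-split: a '>'-headed first line
      obtain ⟨h, tl, hht⟩ := List.exists_cons_of_ne_nil (pvSplit_ne_nil rest ['\n'])
      have hLc : PySem.Chars.splitOn (PySem.Str.strip s).toList ['\n'] = ('>' :: h) :: tl := by
        rw [hrest, pvSplit_nonmatch ['\n'] _ _ (by rw [pvPrefix_nl]; simp), hht]
        rfl
      -- A's side
      rw [hlines, hLc, List.map_cons]
      rw [pvFasta_eq (String.ofList ('>' :: h)) (tl.map String.ofList)
        (by simp [PySem.Chars.startswith, List.isPrefixOf])]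
      rw [← List.map_cons, ← hLc, pvFR_map (PySem.Chars.splitOn (PySem.Str.strip s).toList ['\n']).length _ le_rfl]
      -- B's side
      rw [hrecs, pvR (PySem.Str.strip s).toList.length _ le_rfl, pvPipeB]
      rw [hLc, pvF2 tl.length ('>' :: h) tl le_rfl (by
        intro p hp
        exact pvNoNl (PySem.Str.strip s).toList.length _ le_rfl p (by rw [hLc]; exact hp))]
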